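-- pv_equiv track=rewrite | github.com/sunilnayak84/HarGhar-telemedicine | backend/app/services/symptom_checker.py | check_severity
-- ===== SOURCE A (Python) =====
-- def check_severity(symptoms):
--     # This is a very basic symptom checker. In a real application,
--     # this would be much more sophisticated.
--     high_risk_symptoms = ['difficulty breathing', 'chest pain', 'unconsciousness']
--     medium_risk_symptoms = ['fever', 'persistent cough', 'severe pain']
--
--     symptoms_list = [s.strip().lower() for s in symptoms.split(',')]
--
--     if any(symptom in symptoms_list for symptom in high_risk_symptoms):
--         return 'high'
--     elif any(symptom in symptoms_list for symptom in medium_risk_symptoms):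
--         return 'medium'
--     else:
--         return 'low'
-- ===== SOURCE B (Python) =====
-- def check_severity(symptoms):
--     # single lookup table symptom -> risk rank; one pass over the input symptoms
--     risk_of = {
--         'difficulty breathing': 2, 'chest pain': 2, 'unconsciousness': 2,
--         'fever': 1, 'persistent cough': 1, 'severe pain': 1,
--     }
--     levels = ('low', 'medium', 'high')
--     best = 0
--     for part in symptoms.split(','):
--         best = max(best, risk_of.get(part.strip().lower(), 0))
--     return levels[best]
-- ===== Notes on version B (the rewrite author's own statement) =====
-- stated objective: idiomatic
-- what changed: Replaces the two fixed risk lists scanned against the parsed input with a single symptom->rank dict indexed in one pass over the input symptoms, tracking the maximal rank.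
import Mathlib
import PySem

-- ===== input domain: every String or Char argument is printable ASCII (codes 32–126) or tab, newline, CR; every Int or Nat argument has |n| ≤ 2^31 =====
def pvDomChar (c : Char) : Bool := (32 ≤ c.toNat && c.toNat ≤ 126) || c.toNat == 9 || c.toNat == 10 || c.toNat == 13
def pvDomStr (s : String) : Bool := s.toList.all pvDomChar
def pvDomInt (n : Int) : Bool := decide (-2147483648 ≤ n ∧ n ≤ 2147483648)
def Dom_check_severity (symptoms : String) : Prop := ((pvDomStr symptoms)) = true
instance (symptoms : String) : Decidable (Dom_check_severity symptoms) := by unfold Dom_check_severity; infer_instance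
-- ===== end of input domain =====

-- B replaces A's scans of two fixed risk lists against the parsed input by a single
-- symptom->rank dict indexed in one pass over the input parts, tracking the maximal rank.

-- ===== PORT A =====
def check_severity (symptoms : String) : String :=
  let high_risk_symptoms : List String := ["difficulty breathing", "chest pain", "unconsciousness"]
  let medium_risk_symptoms : List String := ["fever", "persistent cough", "severe pain"]
  -- s.split(","): sep is the non-empty literal ",", so split? is never none
  let symptoms_list := ((PySem.Str.split? symptoms ",").getD []).map (fun s => PySem.Str.lower (PySem.Str.strip s))
  if high_risk_symptoms.any (fun symptom => symptoms_list.contains symptom) then "high"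
  else if medium_risk_symptoms.any (fun symptom => symptoms_list.contains symptom) then "medium"
  else "low"

-- ===== PORT B =====
def pvRiskOf : PySem.Dict String Int :=
  PySem.Dict.ofList [("difficulty breathing", 2), ("chest pain", 2), ("unconsciousness", 2),
                     ("fever", 1), ("persistent cough", 1), ("severe pain", 1)]

def check_severity_alt (symptoms : String) : String :=
  let levels : List String := ["low", "medium", "high"]
  let best := ((PySem.Str.split? symptoms ",").getD []).foldl
    (fun best part => max best (pvRiskOf.getD (PySem.Str.lower (PySem.Str.strip part)) 0)) 0
  -- levels[best]: best is always 0, 1 or 2, so no IndexError and the default is never used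
  PySem.List.pyGetD levels best "low"

-- ===== PRECONDITION & SPEC =====
def Spec_check_severity (symptoms : String) (out : String) : Prop := out = check_severity_alt symptoms
instance (symptoms : String) (out : String) : Decidable (Spec_check_severity symptoms out) := by unfold Spec_check_severity; infer_instance

-- ===== CLAIM (what is proved, stated in full; the proofs are below) =====
def Claim_equal_check_severity : Prop := ∀ (symptoms : String), Dom_check_severity symptoms → Spec_check_severity symptoms (check_severity symptoms)

-- ===== LEMMAS AND PROOFS =====

def pvHi : List String := ["difficulty breathing", "chest pain", "unconsciousness"]
def pvMed : List String := ["fever", "persistent cough", "severe pain"]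
def pvNorm (s : String) : String := PySem.Str.lower (PySem.Str.strip s)

-- B's dict lookup of one normalized part, phrased through A's two lists
lemma pvRiskOf_getD (x : String) :
    pvRiskOf.getD x 0 = if pvHi.contains x then 2 else if pvMed.contains x then 1 else 0 := by
  rw [show pvRiskOf = PySem.Dict.mk [("difficulty breathing", 2), ("chest pain", 2), ("unconsciousness", 2),
                     ("fever", 1), ("persistent cough", 1), ("severe pain", 1)] from by decide]
  simp only [PySem.Dict.getD_eq_get?_getD, PySem.Dict.get?_mk_cons, pvHi, pvMed,
    List.contains_cons, List.contains_nil, beq_iff_eq, Bool.or_eq_true, Bool.or_false]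
  split_ifs <;> subst_vars <;> simp_all [PySem.Dict.get?] <;> tauto

-- the value of B's running maximum over a list of parts
def pvRank (L : List String) : Int :=
  if L.any (fun s => pvHi.contains (pvNorm s)) then 2
  else if L.any (fun s => pvMed.contains (pvNorm s)) then 1 else 0

lemma pvFold_eq (L : List String) (b : Int) (hb : 0 ≤ b) :
    L.foldl (fun b part => max b (pvRiskOf.getD (PySem.Str.lower (PySem.Str.strip part)) 0)) b
      = max b (pvRank L) := by
  induction L generalizing b with
  | nil => simp [pvRank, max_eq_left hb]
  | cons s L ih =>
    rw [List.foldl_cons, ih _ (le_trans hb (le_max_left _ _))]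
    show max (max b (pvRiskOf.getD (pvNorm s) 0)) (pvRank L) = max b (pvRank (s :: L))
    rw [pvRiskOf_getD]
    unfold pvRank
    simp only [List.any_cons]
    rcases Bool.eq_false_or_eq_true (pvHi.contains (pvNorm s)) with h1 | h1 <;>
      rcases Bool.eq_false_or_eq_true (pvMed.contains (pvNorm s)) with h2 | h2 <;>
      rcases Bool.eq_false_or_eq_true (L.any (fun s => pvHi.contains (pvNorm s))) with h3 | h3 <;>
      rcases Bool.eq_false_or_eq_true (L.any (fun s => pvMed.contains (pvNorm s))) with h4 | h4 <;>
      simp only [h1, h2, h3, h4, Bool.or_true, Bool.or_false,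
        if_true, if_false, Bool.false_eq_true] <;>
      (simp only [max_def]; split_ifs <;> omega)

-- A scans the fixed lists against the parsed input; flip it into a scan of the input
lemma pvAny_flip (ks L : List String) :
    ks.any (fun k => (L.map (fun s => PySem.Str.lower (PySem.Str.strip s))).contains k)
      = L.any (fun s => ks.contains (pvNorm s)) := by
  rw [Bool.eq_iff_iff]
  simp only [List.any_eq_true, List.contains_iff_mem, List.mem_map, pvNorm]
  constructor
  · rintro ⟨k, hk, s, hs, rfl⟩; exact ⟨s, hs, hk⟩
  · rintro ⟨s, hs, hk⟩; exact ⟨_, hk, s, hs, rfl⟩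

-- ===== VERDICT (by name: the statement is the Claim_ definition above) =====
theorem check_severity_spec : Claim_equal_check_severity := by
  intro symptoms _
  unfold Spec_check_severity check_severity check_severity_alt
  simp only [pvAny_flip, pvFold_eq _ 0 (le_refl 0), pvRank, pvHi, pvMed]
  rcases Bool.eq_false_or_eq_true
      (((PySem.Str.split? symptoms ",").getD []).any
        (fun s => ["difficulty breathing", "chest pain", "unconsciousness"].contains (pvNorm s))) with h1 | h1 <;>
    rcases Bool.eq_false_or_eq_true
      (((PySem.Str.split? symptoms ",").getD []).any
        (fun s => ["fever", "persistent cough", "severe pain"].contains (pvNorm s))) with h2 | h2 <;>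
    simp only [h1, h2, if_true, if_false, Bool.false_eq_true] <;> rfl
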